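-- pv_equiv track=rewrite | github.com/thehalleyyoung/a3-python | scripts/run_ks_differential.py | extract_verdict
-- ===== SOURCE A (Python) =====
-- def extract_verdict(stdout):
--     """Extract verdict from A3 output."""
--     for line in stdout.splitlines():
--         line = line.strip()
--         if "Verdict:" in line or "verdict:" in line.lower():
--             return line
--         if line.startswith("BUG:") or line.startswith("SAFE") or line.startswith("UNKNOWN"):
--             return line
--     # Look for bug count
--     for line in stdout.splitlines():
--         if "Total bugs found:" in line:
--             return line.strip()
--     return "NO_VERDICT"
-- ===== SOURCE B (Python) =====
-- def extract_verdict(stdout):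
--     """Extract verdict from A3 output (single pass with fallback)."""
--     fallback = None
--     for line in stdout.splitlines():
--         s = line.strip()
--         if ("Verdict:" in s or "verdict:" in s.lower()
--                 or s.startswith("BUG:") or s.startswith("SAFE") or s.startswith("UNKNOWN")):
--             return s
--         if fallback is None and "Total bugs found:" in line:
--             fallback = line.strip()
--     return fallback if fallback is not None else "NO_VERDICT"
-- ===== Notes on version B (the rewrite author's own statement) =====
-- stated objective: simpler
-- what changed: The two sequential scans over stdout.splitlines() are merged into one pass that returns immediately on a verdict line and keeps the first bug-count line as a fallback accumulator.
import Mathlib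
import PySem

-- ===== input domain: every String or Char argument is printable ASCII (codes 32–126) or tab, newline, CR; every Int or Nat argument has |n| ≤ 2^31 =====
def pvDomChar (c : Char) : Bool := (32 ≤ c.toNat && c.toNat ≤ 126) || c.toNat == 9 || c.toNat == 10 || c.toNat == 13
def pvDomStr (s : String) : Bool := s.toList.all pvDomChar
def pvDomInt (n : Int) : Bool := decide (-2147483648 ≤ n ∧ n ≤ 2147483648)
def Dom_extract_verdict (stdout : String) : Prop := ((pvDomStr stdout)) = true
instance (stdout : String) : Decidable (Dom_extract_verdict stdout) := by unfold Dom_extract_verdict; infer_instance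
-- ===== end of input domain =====

-- B is a single pass: the two sequential scans of A are merged into one loop
-- that returns immediately on a verdict line and keeps the first bug-count
-- line as a fallback (objective: simpler).

-- ===== PORT A =====
-- first loop of A: return the first stripped line matching a verdict condition
def evA_loop1 : List String → Option String
  | [] => none
  | l :: rest =>
    let line := PySem.Str.strip l
    if PySem.Str.isIn "Verdict:" line || PySem.Str.isIn "verdict:" (PySem.Str.lower line) then
      some line
    else if PySem.Str.startswith line "BUG:" || PySem.Str.startswith line "SAFE" || PySem.Str.startswith line "UNKNOWN" then
      some line
    else evA_loop1 rest

-- second loop of A: first (unstripped) line containing the bug-count marker, stripped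
def evA_loop2 : List String → Option String
  | [] => none
  | l :: rest =>
    if PySem.Str.isIn "Total bugs found:" l then some (PySem.Str.strip l)
    else evA_loop2 rest

def extract_verdict (stdout : String) : String :=
  match evA_loop1 (PySem.Str.splitlines stdout) with
  | some r => r
  | none =>
    match evA_loop2 (PySem.Str.splitlines stdout) with
    | some r => r
    | none => "NO_VERDICT"

-- ===== PORT B =====
-- single pass with a fallback accumulator
def evB_loop : List String → Option String → String
  | [], fallback =>
    match fallback with
    | some f => f
    | none => "NO_VERDICT"
  | l :: rest, fallback =>
    let s := PySem.Str.strip l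
    if PySem.Str.isIn "Verdict:" s || PySem.Str.isIn "verdict:" (PySem.Str.lower s)
        || PySem.Str.startswith s "BUG:" || PySem.Str.startswith s "SAFE" || PySem.Str.startswith s "UNKNOWN" then
      s
    else
      evB_loop rest
        (if fallback.isNone && PySem.Str.isIn "Total bugs found:" l then some (PySem.Str.strip l) else fallback)

def extract_verdict_alt (stdout : String) : String :=
  evB_loop (PySem.Str.splitlines stdout) none

-- ===== PRECONDITION & SPEC =====
def Spec_extract_verdict (stdout : String) (out : String) : Prop := out = extract_verdict_alt stdout
instance (stdout : String) (out : String) : Decidable (Spec_extract_verdict stdout out) := by unfold Spec_extract_verdict; infer_instance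

-- ===== CLAIM (what is proved, stated in full; the proofs are below) =====
def Claim_equal_extract_verdict : Prop := ∀ (stdout : String), Dom_extract_verdict stdout → Spec_extract_verdict stdout (extract_verdict stdout)

-- ===== LEMMAS AND PROOFS =====
-- one pass with a fallback computes the composition of A's two loops
theorem evB_loop_eq (lines : List String) (fb : Option String) :
    evB_loop lines fb =
      match evA_loop1 lines with
      | some r => r
      | none =>
        match fb with
        | some f => f
        | none =>
          match evA_loop2 lines with
          | some r => r
          | none => "NO_VERDICT" := by
  induction lines generalizing fb with
  | nil => cases fb <;> simp [evB_loop, evA_loop1, evA_loop2]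
  | cons l rest ih =>
    simp only [evB_loop, evA_loop1, evA_loop2]
    rw [ih]
    generalize PySem.Str.isIn "Verdict:" (PySem.Str.strip l) = a
    generalize PySem.Str.isIn "verdict:" (PySem.Str.lower (PySem.Str.strip l)) = b
    generalize PySem.Str.startswith (PySem.Str.strip l) "BUG:" = c
    generalize PySem.Str.startswith (PySem.Str.strip l) "SAFE" = d
    generalize PySem.Str.startswith (PySem.Str.strip l) "UNKNOWN" = e
    generalize PySem.Str.isIn "Total bugs found:" l = f
    cases a <;> cases b <;> cases c <;> cases d <;> cases e <;> cases f <;>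
      cases fb <;> simp

-- ===== VERDICT (by name: the statement is the Claim_ definition above) =====
theorem extract_verdict_spec : Claim_equal_extract_verdict := by
  intro stdout _
  unfold Spec_extract_verdict extract_verdict extract_verdict_alt
  rw [evB_loop_eq]
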